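-- pv_equiv track=rewrite | github.com/rixhal/yt-studio-master | yt_master_core.py | determine_genre_preset
-- ===== SOURCE A (Python) =====
-- def determine_genre_preset(genre: str, style: str = "") -> str:
--     """
--     Determine optimal mastering preset based on genre and style
--     """
--     genre_lower = genre.lower() if genre else ""
--     style_lower = style.lower() if style else ""
--
--     # Electronic/Dance music mapping
--     if any(
--         term in genre_lower
--         for term in ["electronic", "dance", "edm", "techno", "house"]
--     ):
--         if any(term in style_lower for term in ["hardstyle", "hardcore", "gabber"]):
--             return "hardstyle"
--         elif any(
--             term in style_lower for term in ["deep house", "ambient", "downtempo"]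
--         ):
--             return "ambient"
--         else:
--             return "club"
--
--     # Hip-Hop/Rap mapping
--     elif any(term in genre_lower for term in ["hip hop", "rap", "trap"]):
--         return "hiphop"
--
--     # Rock/Metal mapping
--     elif any(term in genre_lower for term in ["rock", "metal", "punk"]):
--         if any(
--             term in style_lower
--             for term in ["heavy metal", "death metal", "black metal"]
--         ):
--             return "metal"
--         else:
--             return "rock"
--
--     # Pop/Commercial mapping
--     elif any(term in genre_lower for term in ["pop", "r&b", "soul"]):
--         return "pop"
--
--     # Classical/Jazz mapping
--     elif any(term in genre_lower for term in ["classical", "jazz", "acoustic"]):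
--         return "acoustic"
--
--     # Streaming-optimized for unknown
--     else:
--         return "streaming"
-- ===== SOURCE B (Python) =====
-- # Flat keyword tables + priority minimum: collect ALL matching categories in one
-- # full scan and pick the best by min rank, instead of an ordered short-circuit cascade.
-- GENRE_KW = [("electronic", 0), ("dance", 0), ("edm", 0), ("techno", 0), ("house", 0),
--             ("hip hop", 1), ("rap", 1), ("trap", 1),
--             ("rock", 2), ("metal", 2), ("punk", 2),
--             ("pop", 3), ("r&b", 3), ("soul", 3),
--             ("classical", 4), ("jazz", 4), ("acoustic", 4)]
-- STYLE_KW = [(0, 0, "hardstyle"), (0, 0, "hardcore"), (0, 0, "gabber"),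
--             (0, 1, "deep house"), (0, 1, "ambient"), (0, 1, "downtempo"),
--             (2, 0, "heavy metal"), (2, 0, "death metal"), (2, 0, "black metal")]
-- OVERRIDES = {(0, 0): "hardstyle", (0, 1): "ambient", (2, 0): "metal"}
-- DEFAULTS = ["club", "hiphop", "rock", "pop", "acoustic"]
--
--
-- def _resolve(cat, style_lower):
--     srs = [r for c, r, kw in STYLE_KW if c == cat and kw in style_lower]
--     if srs:
--         return OVERRIDES[(cat, min(srs))]
--     return DEFAULTS[cat]
--
--
-- def determine_genre_preset(genre: str, style: str = "") -> str:
--     genre_lower = genre.lower() if genre else ""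
--     style_lower = style.lower() if style else ""
--     ranks = [r for kw, r in GENRE_KW if kw in genre_lower]
--     if not ranks:
--         return "streaming"
--     return _resolve(min(ranks), style_lower)
-- ===== Notes on version B (the rewrite author's own statement) =====
-- stated objective: alternative
-- what changed: A's ordered short-circuit if/elif cascade is replaced by flat (keyword, priority-rank) tables scanned in full, with the category and the style override each chosen as the minimum rank among all matches (plus dict/list lookups for the preset names).
import Mathlib
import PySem

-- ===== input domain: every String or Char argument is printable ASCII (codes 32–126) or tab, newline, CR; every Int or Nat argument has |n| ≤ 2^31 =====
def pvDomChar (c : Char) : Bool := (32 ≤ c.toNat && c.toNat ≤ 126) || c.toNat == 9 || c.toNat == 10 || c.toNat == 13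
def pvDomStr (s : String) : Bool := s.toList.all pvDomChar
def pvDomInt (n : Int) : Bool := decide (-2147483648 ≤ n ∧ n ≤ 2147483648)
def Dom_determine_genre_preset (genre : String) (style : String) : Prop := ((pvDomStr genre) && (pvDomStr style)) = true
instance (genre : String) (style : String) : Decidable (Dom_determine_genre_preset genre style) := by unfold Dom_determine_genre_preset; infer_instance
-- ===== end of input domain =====

-- B replaces A's ordered short-circuit keyword cascade by flat keyword tables scanned in full, picking the category and style override by minimum priority rank (alternative decomposition, same results).


-- ===== PORT A =====
def determine_genre_preset (genre : String) (style : String) : String :=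
  let genre_lower := if genre ≠ "" then PySem.Str.lower genre else ""
  let style_lower := if style ≠ "" then PySem.Str.lower style else ""
  if ["electronic", "dance", "edm", "techno", "house"].any (fun t => PySem.Str.isIn t genre_lower) then
    if ["hardstyle", "hardcore", "gabber"].any (fun t => PySem.Str.isIn t style_lower) then "hardstyle"
    else if ["deep house", "ambient", "downtempo"].any (fun t => PySem.Str.isIn t style_lower) then "ambient"
    else "club"
  else if ["hip hop", "rap", "trap"].any (fun t => PySem.Str.isIn t genre_lower) then "hiphop"
  else if ["rock", "metal", "punk"].any (fun t => PySem.Str.isIn t genre_lower) then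
    if ["heavy metal", "death metal", "black metal"].any (fun t => PySem.Str.isIn t style_lower) then "metal"
    else "rock"
  else if ["pop", "r&b", "soul"].any (fun t => PySem.Str.isIn t genre_lower) then "pop"
  else if ["classical", "jazz", "acoustic"].any (fun t => PySem.Str.isIn t genre_lower) then "acoustic"
  else "streaming"

-- ===== PORT B =====
-- B-side tables (Source B's GENRE_KW / STYLE_KW / OVERRIDES / DEFAULTS)
def dgpGenreKW : List (String × Nat) :=
  [("electronic", 0), ("dance", 0), ("edm", 0), ("techno", 0), ("house", 0),
   ("hip hop", 1), ("rap", 1), ("trap", 1),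
   ("rock", 2), ("metal", 2), ("punk", 2),
   ("pop", 3), ("r&b", 3), ("soul", 3),
   ("classical", 4), ("jazz", 4), ("acoustic", 4)]

def dgpStyleKW : List (Nat × Nat × String) :=
  [(0, 0, "hardstyle"), (0, 0, "hardcore"), (0, 0, "gabber"),
   (0, 1, "deep house"), (0, 1, "ambient"), (0, 1, "downtempo"),
   (2, 0, "heavy metal"), (2, 0, "death metal"), (2, 0, "black metal")]

def dgpOverrides : PySem.Dict (Nat × Nat) String :=
  PySem.Dict.ofList [((0, 0), "hardstyle"), ((0, 1), "ambient"), ((2, 0), "metal")]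

def dgpDefaults : List String := ["club", "hiphop", "rock", "pop", "acoustic"]

-- Source B's _resolve helper
def dgpResolve (cat : Nat) (style_lower : String) : String :=
  let srs := dgpStyleKW.filterMap (fun t => if t.1 = cat ∧ PySem.Str.isIn t.2.2 style_lower then some t.2.1 else none)
  match PySem.List.min? srs (fun x => x) with
  | some m => (PySem.Dict.get? dgpOverrides (cat, m)).getD ""  -- KeyError unreachable: srs nonempty forces (cat, m) ∈ {(0,0),(0,1),(2,0)}
  | none => dgpDefaults.getD cat ""                            -- IndexError unreachable: cat ≤ 4

def determine_genre_preset_alt (genre : String) (style : String) : String :=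
  let genre_lower := if genre ≠ "" then PySem.Str.lower genre else ""
  let style_lower := if style ≠ "" then PySem.Str.lower style else ""
  let ranks := dgpGenreKW.filterMap (fun p => if PySem.Str.isIn p.1 genre_lower then some p.2 else none)
  match PySem.List.min? ranks (fun x => x) with
  | none => "streaming"
  | some cat => dgpResolve cat style_lower

-- ===== PRECONDITION & SPEC =====
def Spec_determine_genre_preset (genre : String) (style : String) (out : String) : Prop := out = determine_genre_preset_alt genre style
instance (genre : String) (style : String) (out : String) : Decidable (Spec_determine_genre_preset genre style out) := by unfold Spec_determine_genre_preset; infer_instance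

-- ===== CLAIM =====
def Claim_equal_determine_genre_preset : Prop := ∀ (genre : String) (style : String), Dom_determine_genre_preset genre style → Spec_determine_genre_preset genre style (determine_genre_preset genre style)

-- ===== LEMMAS AND PROOFS =====

-- the loop body of PySem.List.min? with key = identity, named so it can be rewritten
def pvStep : Option Nat → Nat → Option Nat :=
  fun acc x => match acc with
    | none => some x
    | some m => if x < m then some x else some m

lemma pvFoldStay (t : List Nat) : ∀ m : Nat, (∀ y ∈ t, m ≤ y) →
    List.foldl pvStep (some m) t = some m := by
  induction t with
  | nil => intro m _; rfl
  | cons a t ih =>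
      intro m h
      rw [List.foldl_cons]
      have hs : pvStep (some m) a = some m := by
        unfold pvStep
        simp only
        rw [if_neg (Nat.not_lt.mpr (h a (by simp)))]
      rw [hs]
      exact ih m (fun y hy => h y (by simp [hy]))

-- Python's min over a nondecreasing list is its first element
lemma pvMin?_sorted (l : List Nat) (h : l.Pairwise (· ≤ ·)) :
    PySem.List.min? l (fun x => x) = l.head? := by
  have hmin : PySem.List.min? l (fun x => x) = List.foldl pvStep none l := by
    unfold PySem.List.min? pvStep
    congr 1
    funext acc x
    cases acc <;> rfl
  rw [hmin]
  cases l with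
  | nil => rfl
  | cons a t =>
      rw [List.foldl_cons]
      have hs : pvStep none a = some a := rfl
      rw [hs]
      exact pvFoldStay t a (List.pairwise_cons.mp h).1

-- the collected genre ranks are nondecreasing (the table is grouped by rank)
lemma pvRanksPairwise (gl : String) :
    (dgpGenreKW.filterMap (fun p => if PySem.Str.isIn p.1 gl then some p.2 else none)).Pairwise (· ≤ ·) := by
  rw [List.pairwise_filterMap]
  have base : dgpGenreKW.Pairwise (fun a b => a.2 ≤ b.2) := by decide
  exact base.imp (by intro a b hab x hx y hy; split at hx <;> split at hy <;> simp_all)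

lemma pvStylePairwise0 (sl : String) :
    (dgpStyleKW.filterMap (fun t => if t.1 = 0 ∧ PySem.Str.isIn t.2.2 sl then some t.2.1 else none)).Pairwise (· ≤ ·) := by
  rw [List.pairwise_filterMap]
  have base : dgpStyleKW.Pairwise (fun a b => a.1 = 0 → b.1 = 0 → a.2.1 ≤ b.2.1) := by decide
  exact base.imp (by intro a b hab x hx y hy; split at hx <;> split at hy <;> simp_all)

lemma pvStylePairwise2 (sl : String) :
    (dgpStyleKW.filterMap (fun t => if t.1 = 2 ∧ PySem.Str.isIn t.2.2 sl then some t.2.1 else none)).Pairwise (· ≤ ·) := by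
  rw [List.pairwise_filterMap]
  have base : dgpStyleKW.Pairwise (fun a b => a.1 = 2 → b.1 = 2 → a.2.1 ≤ b.2.1) := by decide
  exact base.imp (by intro a b hab x hx y hy; split at hx <;> split at hy <;> simp_all)

-- the style stage of B, category by category, equals A's style expressions
set_option maxHeartbeats 2000000 in
lemma pvStyle0 (sl : String) :
    dgpResolve 0 sl =
    (if ["hardstyle", "hardcore", "gabber"].any (fun t => PySem.Str.isIn t sl) then "hardstyle"
     else if ["deep house", "ambient", "downtempo"].any (fun t => PySem.Str.isIn t sl) then "ambient"
     else "club") := by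
  unfold dgpResolve
  dsimp only
  rw [pvMin?_sorted _ (pvStylePairwise0 sl), List.head?_filterMap]
  simp only [dgpStyleKW, List.findSome?_cons, List.findSome?_nil]
  split_ifs <;> simp_all [List.any_cons, List.any_nil] <;> decide

set_option maxHeartbeats 2000000 in
lemma pvStyle2 (sl : String) :
    dgpResolve 2 sl =
    (if ["heavy metal", "death metal", "black metal"].any (fun t => PySem.Str.isIn t sl) then "metal"
     else "rock") := by
  unfold dgpResolve
  dsimp only
  rw [pvMin?_sorted _ (pvStylePairwise2 sl), List.head?_filterMap]
  simp only [dgpStyleKW, List.findSome?_cons, List.findSome?_nil]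
  split_ifs <;> simp_all [List.any_cons, List.any_nil] <;> decide

lemma pvStyle1 (sl : String) : dgpResolve 1 sl = "hiphop" := by
  unfold dgpResolve
  dsimp only
  have h : dgpStyleKW.filterMap (fun t => if t.1 = 1 ∧ PySem.Str.isIn t.2.2 sl then some t.2.1 else none) = [] := by
    rw [List.filterMap_eq_nil_iff]
    intro t ht
    fin_cases ht <;> simp
  rw [h]
  rfl

lemma pvStyle3 (sl : String) : dgpResolve 3 sl = "pop" := by
  unfold dgpResolve
  dsimp only
  have h : dgpStyleKW.filterMap (fun t => if t.1 = 3 ∧ PySem.Str.isIn t.2.2 sl then some t.2.1 else none) = [] := by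
    rw [List.filterMap_eq_nil_iff]
    intro t ht
    fin_cases ht <;> simp
  rw [h]
  rfl

lemma pvStyle4 (sl : String) : dgpResolve 4 sl = "acoustic" := by
  unfold dgpResolve
  dsimp only
  have h : dgpStyleKW.filterMap (fun t => if t.1 = 4 ∧ PySem.Str.isIn t.2.2 sl then some t.2.1 else none) = [] := by
    rw [List.filterMap_eq_nil_iff]
    intro t ht
    fin_cases ht <;> simp
  rw [h]
  rfl

-- each constant-rank segment of the genre table: first match = "any keyword occurs"
lemma pvSeg (gl : String) (kws : List String) (c : Nat) :
    List.findSome? (fun p => if PySem.Str.isIn p.1 gl then some p.2 else none) (kws.map (fun k => (k, c))) =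
    (if kws.any (fun t => PySem.Str.isIn t gl) then some c else none) := by
  induction kws with
  | nil => rfl
  | cons k t ih =>
      by_cases h : PySem.Str.isIn k gl <;> simp_all

-- the first matching table entry = A's ordered category tests
lemma pvFindChain (gl : String) :
    List.findSome? (fun p => if PySem.Str.isIn p.1 gl then some p.2 else none) dgpGenreKW =
    (if ["electronic", "dance", "edm", "techno", "house"].any (fun t => PySem.Str.isIn t gl) then some 0
     else if ["hip hop", "rap", "trap"].any (fun t => PySem.Str.isIn t gl) then some 1
     else if ["rock", "metal", "punk"].any (fun t => PySem.Str.isIn t gl) then some 2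
     else if ["pop", "r&b", "soul"].any (fun t => PySem.Str.isIn t gl) then some 3
     else if ["classical", "jazz", "acoustic"].any (fun t => PySem.Str.isIn t gl) then some 4
     else none) := by
  have hsplit : dgpGenreKW =
      (["electronic", "dance", "edm", "techno", "house"].map (fun k => (k, 0))) ++
      ((["hip hop", "rap", "trap"].map (fun k => (k, 1))) ++
      ((["rock", "metal", "punk"].map (fun k => (k, 2))) ++
      ((["pop", "r&b", "soul"].map (fun k => (k, 3))) ++
      (["classical", "jazz", "acoustic"].map (fun k => (k, 4)))))) := rfl
  rw [hsplit, List.findSome?_append, List.findSome?_append, List.findSome?_append, List.findSome?_append,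
      pvSeg, pvSeg, pvSeg, pvSeg, pvSeg]
  split_ifs <;> rfl

-- A = B: B's min-of-ranks is the first matching table entry, then the style stages coincide
set_option maxHeartbeats 1000000 in
lemma pvMain (genre style : String) : determine_genre_preset genre style = determine_genre_preset_alt genre style := by
  unfold determine_genre_preset determine_genre_preset_alt
  dsimp only
  rw [pvMin?_sorted _ (pvRanksPairwise _), List.head?_filterMap, pvFindChain]
  split_ifs <;> simp_all [pvStyle0, pvStyle1, pvStyle2, pvStyle3, pvStyle4]

-- ===== VERDICT =====
theorem determine_genre_preset_spec : Claim_equal_determine_genre_preset := by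
  intro genre style _
  unfold Spec_determine_genre_preset
  exact pvMain genre style
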